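-- pv_equiv track=rewrite | github.com/youngtipper/main-girl_of-school-jessica | ДЗ 2 семестр/вхождение строки.py | gotintothattxt
-- ===== SOURCE A (Python) =====
-- def gotintothattxt(s, text):
--     if not s or not text:
--         return 0
--
--     n = len(s)
--     total = 0
--
--     for shift in range(n):
--         current_shift = s[shift:] + s[:shift]
--         pos = 0
--         while True:
--             pos = text.find(current_shift, pos)
--             if pos == -1:
--                 break
--             total += 1
--             pos += 1
--
--     return total
-- ===== SOURCE B (Python) =====
-- def gotintothattxt(s, text):
--     if not s or not text:
--         return 0
--     n = len(s)
--     doubled = s + s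
--     mult = {}
--     for shift in range(n):
--         rot = doubled[shift:shift + n]
--         mult[rot] = mult.get(rot, 0) + 1
--     total = 0
--     for i in range(len(text) - n + 1):
--         total += mult.get(text[i:i + n], 0)
--     return total
-- ===== Notes on version B (the rewrite author's own statement) =====
-- stated objective: faster
-- what changed: Instead of running a separate overlapping find-scan of text for every rotation of s, B builds a multiplicity table of the n rotations (read as windows of s+s) once and makes a single sliding pass over text, adding the multiplicity of each window.
import Mathlib
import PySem

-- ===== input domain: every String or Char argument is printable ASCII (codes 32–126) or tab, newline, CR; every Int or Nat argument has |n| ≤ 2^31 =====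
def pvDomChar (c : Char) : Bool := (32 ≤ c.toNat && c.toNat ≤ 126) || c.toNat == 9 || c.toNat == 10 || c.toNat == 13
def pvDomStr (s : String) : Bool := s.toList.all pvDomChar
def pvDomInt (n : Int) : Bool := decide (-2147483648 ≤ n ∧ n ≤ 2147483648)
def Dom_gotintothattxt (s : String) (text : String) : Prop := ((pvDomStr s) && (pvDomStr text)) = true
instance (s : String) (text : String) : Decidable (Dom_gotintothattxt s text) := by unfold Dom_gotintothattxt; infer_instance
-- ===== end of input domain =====

-- B replaces A's per-rotation find-scan of text with one multiplicity table of the rotations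
-- (windows of s+s) and a single sliding pass over text (objective: faster, measured).
-- ===== PORT A =====

-- bounds of Python's str.find(sub, pos): used only for the termination of pvFindLoopA
theorem pvFindFrom_bounds (ct cur : List Char) (p : Int)
    (h : PySem.Chars.findFrom ct cur p none ≠ -1) :
    p.toNat ≤ (PySem.Chars.findFrom ct cur p none).toNat ∧
    (PySem.Chars.findFrom ct cur p none).toNat ≤ ct.length ∧
    0 ≤ PySem.Chars.findFrom ct cur p none := by
  unfold PySem.Chars.findFrom at h ⊢
  dsimp only at h ⊢
  have hr1 := PySem.Chars.neg_one_le_find (List.drop (if p < 0 then if p + ↑ct.length < 0 then 0 else p + ↑ct.length else p).toNat (List.take (ct.length:Int).toNat ct)) cur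
  have hr2 := PySem.Chars.find_le_length (List.drop (if p < 0 then if p + ↑ct.length < 0 then 0 else p + ↑ct.length else p).toNat (List.take (ct.length:Int).toNat ct)) cur
  simp only [List.length_drop, List.length_take] at hr2
  split_ifs at h hr1 hr2 ⊢ <;> omega

-- the inner `while True: pos = text.find(cur, pos); …` loop of A
def pvFindLoopA (ct cur : List Char) (pos : Int) (total : Int) : Int :=
  if PySem.Chars.findFrom ct cur pos none = -1 then total
  else pvFindLoopA ct cur (PySem.Chars.findFrom ct cur pos none + 1) (total + 1)
termination_by ct.length + 1 - pos.toNat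
decreasing_by
  rcases pvFindFrom_bounds ct cur pos (by assumption) with ⟨h1, h2, h3⟩
  omega

def gotintothattxt (s : String) (text : String) : Int :=
  if s.toList = [] ∨ text.toList = [] then 0
  else
    (PySem.List.pyRange 0 (s.toList.length : Int)).foldl
      (fun total shift =>
        pvFindLoopA text.toList
          (PySem.List.slice s.toList (some shift) none ++ PySem.List.slice s.toList none (some shift))
          0 total) 0

-- ===== PORT B =====
-- B: multiplicity table of the n rotations (windows of s+s), then one sliding pass over text
def gotintothattxt_alt (s : String) (text : String) : Int :=
  if s.toList = [] ∨ text.toList = [] then 0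
  else
    let cs := s.toList
    let n : Int := (cs.length : Int)
    let doubled := cs ++ cs
    let mult : PySem.Dict (List Char) Int :=
      (PySem.List.pyRange 0 n).foldl
        (fun d shift =>
          let rot := PySem.List.slice doubled (some shift) (some (shift + n))
          d.insert rot (d.getD rot 0 + 1)) PySem.Dict.empty
    (PySem.List.pyRange 0 ((text.toList.length : Int) - n + 1)).foldl
      (fun total i =>
        total + mult.getD (PySem.List.slice text.toList (some i) (some (i + n))) 0) 0

-- ===== PRECONDITION & SPEC =====
def Spec_gotintothattxt (s : String) (text : String) (out : Int) : Prop := out = gotintothattxt_alt s text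
instance (s : String) (text : String) (out : Int) : Decidable (Spec_gotintothattxt s text out) := by unfold Spec_gotintothattxt; infer_instance

-- ===== CLAIM (what is proved, stated in full; the proofs are below) =====
def Claim_equal_gotintothattxt : Prop := ∀ (s : String) (text : String), Dom_gotintothattxt s text → Spec_gotintothattxt s text (gotintothattxt s text)

-- ===== LEMMAS AND PROOFS =====
-- abbreviations used only by the proofs
def pvRot (cs : List Char) (k : Nat) : List Char := cs.drop k ++ cs.take k

def pvWin (ct : List Char) (n i : Nat) : List Char := (ct.drop i).take n

def pvWins (ct : List Char) (n : Nat) : List (List Char) :=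
  (List.range (ct.length + 1 - n)).map (pvWin ct n)

def pvOcc (ct cur : List Char) (pos : Nat) : Int :=
  ((List.range (ct.length + 1)).countP (fun j => decide (pos ≤ j ∧ cur <+: ct.drop j)) : Int)

-- str.find with a start index past the end returns -1
theorem pvFindFrom_gt (ct cur : List Char) (p : Int) (h : (ct.length : Int) < p) :
    PySem.Chars.findFrom ct cur p none = -1 := by
  unfold PySem.Chars.findFrom
  dsimp only
  split_ifs <;> omega

-- generic: counting a predicate that holds at exactly one more point
theorem pv_countP_succ {p q : Nat → Bool} (jn : Nat)
    (hpjn : p jn = true) (hqjn : q jn = false) :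
    ∀ N, jn < N → (∀ x, x < N → (p x = true ↔ (q x = true ∨ x = jn))) →
    (List.range N).countP p = (List.range N).countP q + 1 := by
  intro N
  induction N with
  | zero => omega
  | succ N ih =>
    intro hjn hiff
    rw [List.range_succ, List.countP_append, List.countP_append]
    by_cases hN : jn = N
    · subst hN
      have heq : (List.range jn).countP p = (List.range jn).countP q := by
        apply List.countP_congr
        intro x hx
        have hxN : x < jn := List.mem_range.mp hx
        have h := hiff x (by omega)
        constructor
        · intro hp; rcases h.mp hp with h' | h'
          · exact h'
          · omega
        · intro hq; exact h.mpr (Or.inl hq)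
      simp [heq, hpjn, hqjn]
    · have hpN : p N = q N := by
        have h := hiff N (by omega)
        by_cases hq : q N = true
        · simp [hq, h.mpr (Or.inl hq)]
        · simp only [Bool.not_eq_true] at hq
          rw [hq]
          by_cases hp : p N = true
          · rcases h.mp hp with h' | h'
            · rw [hq] at h'; exact absurd h' (by simp)
            · omega
          · simp only [Bool.not_eq_true] at hp; exact hp
      rw [ih (by omega) (fun x hx => hiff x (by omega))]
      simp [List.countP_cons, hpN]
      omega

-- generic: a predicate false from M on counts the same on range N and range M
theorem pv_countP_restrict {p : Nat → Bool} (N M : Nat) (hMN : M ≤ N)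
    (hfalse : ∀ x, M ≤ x → x < N → p x = false) :
    (List.range N).countP p = (List.range M).countP p := by
  induction N with
  | zero =>
    have hM0 : M = 0 := by omega
    rw [hM0]
  | succ N ih =>
    by_cases hM : M = N + 1
    · rw [hM]
    · have h1 : M ≤ N := by omega
      rw [List.range_succ, List.countP_append, ih h1 (fun x h2 h3 => hfalse x h2 (by omega))]
      simp [hfalse N h1 (by omega)]

-- no occurrence of cur at an in-range index ≥ pos ⇒ pvOcc = 0
theorem pvOcc_eq_zero (ct cur : List Char) (pos : Nat)
    (h : ∀ j, pos ≤ j → j < ct.length + 1 → ¬ cur <+: ct.drop j) : pvOcc ct cur pos = 0 := by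
  unfold pvOcc
  have hz : (List.range (ct.length + 1)).countP
      (fun j => decide (pos ≤ j ∧ cur <+: ct.drop j)) = 0 := by
    rw [List.countP_eq_zero]
    intro x hx
    simp only [decide_eq_true_eq, not_and]
    exact fun hp => h x hp (List.mem_range.mp hx)
  rw [hz]
  rfl

-- pvOcc steps by one at the first occurrence jn
theorem pvOcc_step (ct cur : List Char) (pos jn : Nat)
    (hle : pos ≤ jn) (hlen : jn ≤ ct.length)
    (hpre : cur <+: ct.drop jn)
    (hmin : ∀ i, pos ≤ i → i < jn → ¬ cur <+: ct.drop i) :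
    pvOcc ct cur pos = 1 + pvOcc ct cur (jn + 1) := by
  unfold pvOcc
  rw [pv_countP_succ jn
      (p := fun j => decide (pos ≤ j ∧ cur <+: ct.drop j))
      (q := fun j => decide (jn + 1 ≤ j ∧ cur <+: ct.drop j))
      (by simp only [decide_eq_true_eq]; exact ⟨hle, hpre⟩)
      (by simp only [decide_eq_false_iff_not, not_and]; intro hc; omega)
      (ct.length + 1) (by omega)
      (by
        intro x _
        simp only [decide_eq_true_eq]
        constructor
        · rintro ⟨hpx, hprex⟩
          by_cases hx : x < jn
          · exact absurd hprex (hmin x hpx hx)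
          · by_cases hx2 : x = jn
            · exact Or.inr hx2
            · exact Or.inl ⟨by omega, hprex⟩
        · rintro (⟨hx1, hx2⟩ | rfl)
          · exact ⟨by omega, hx2⟩
          · exact ⟨hle, hpre⟩)]
  push_cast
  ring

-- the A-side while loop counts the occurrences at or after pos
theorem pvFindLoopA_eq (ct cur : List Char) :
    ∀ (fuel pos : Nat), ct.length + 1 - pos ≤ fuel →
      ∀ total : Int, pvFindLoopA ct cur (pos : Int) total = total + pvOcc ct cur pos := by
  intro fuel
  induction fuel with
  | zero =>
    intro pos hfuel total
    have hgt : (ct.length : Int) < (pos : Int) := by omega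
    rw [pvFindLoopA, if_pos (pvFindFrom_gt ct cur pos hgt)]
    rw [pvOcc_eq_zero ct cur pos (fun j hj hjr _ => by omega)]
    ring
  | succ fuel ih =>
    intro pos hfuel total
    by_cases hpos : ct.length < pos
    · have hgt : (ct.length : Int) < (pos : Int) := by omega
      rw [pvFindLoopA, if_pos (pvFindFrom_gt ct cur pos hgt)]
      rw [pvOcc_eq_zero ct cur pos (fun j hj hjr _ => by omega)]
      ring
    · have hple : pos ≤ ct.length := by omega
      by_cases hfind : PySem.Chars.findFrom ct cur (pos : Int) none = -1
      · rw [pvFindLoopA, if_pos hfind]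
        have hninf : ¬ cur <:+: ct.drop pos :=
          (PySem.Chars.findFrom_natCast_eq_neg_one_iff ct cur pos hple).mp hfind
        rw [pvOcc_eq_zero ct cur pos (by
          intro j hj _ hpre
          apply hninf
          have hd : pos + (j - pos) = j := by omega
          have : cur <+: (ct.drop pos).drop (j - pos) := by
            rw [List.drop_drop, hd]; exact hpre
          exact this.isInfix.trans (List.drop_suffix (j - pos) (ct.drop pos)).isInfix)]
        ring
      · obtain ⟨h1, h2, h3⟩ := PySem.Chars.findFrom_natCast_spec ct cur pos hple hfind
        obtain ⟨b1, b2, b3⟩ := pvFindFrom_bounds ct cur (pos : Int) hfind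
        set j := PySem.Chars.findFrom ct cur (pos : Int) none with hj
        have hjn : j + 1 = ((j.toNat + 1 : Nat) : Int) := by omega
        rw [pvFindLoopA, if_neg hfind, ← hj, hjn,
            ih (j.toNat + 1) (by omega) (total + 1),
            pvOcc_step ct cur pos j.toNat (by omega) b2 h2 h3]
        ring



-- pvOcc from 0 is the number of windows equal to cur
theorem pvOcc_eq_count (ct cur : List Char) (n : Nat) (hn : 1 ≤ n) (hcur : cur.length = n) :
    pvOcc ct cur 0 = ((pvWins ct n).count cur : Int) := by
  unfold pvOcc pvWins
  have h1 : (List.range (ct.length + 1)).countP (fun j => decide (0 ≤ j ∧ cur <+: ct.drop j))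
      = (List.range (ct.length + 1)).countP (fun j => pvWin ct n j == cur) := by
    apply List.countP_congr
    intro j _
    simp only [decide_eq_true_eq, Nat.zero_le, true_and, beq_iff_eq]
    constructor
    · intro hpre
      have := List.prefix_iff_eq_take.mp hpre
      rw [hcur] at this
      exact (this ▸ rfl : pvWin ct n j = cur).symm ▸ rfl
    · intro hwin
      have : cur <+: ct.drop j := hwin ▸ List.take_prefix n (ct.drop j)
      exact this
  rw [h1]
  rw [pv_countP_restrict (ct.length + 1) (ct.length + 1 - n) (by omega)
      (by
        intro j hj1 hj2
        simp only [beq_eq_false_iff_ne, ne_eq]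
        intro hwin
        have hlen : (pvWin ct n j).length = cur.length := by rw [hwin]
        simp only [pvWin, List.length_take, List.length_drop, hcur] at hlen
        omega)]
  rw [List.count_eq_countP, List.countP_map]
  rfl

-- double counting: summing counts of l1's elements in l2 equals the converse
theorem pv_sum_count_comm (l1 l2 : List (List Char)) :
    (l1.map fun a => ((l2.count a : Nat) : Int)).sum
      = (l2.map fun b => ((l1.count b : Nat) : Int)).sum := by
  induction l1 with
  | nil => simp
  | cons a l1 ih =>
    have hcnt : ∀ b, (((a :: l1).count b : Nat) : Int)
        = ((l1.count b : Nat) : Int) + (if b == a then (1 : Int) else 0) := by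
      intro b
      rw [List.count_cons]
      by_cases h : b = a
      · subst h; simp
      · have h1 : (b == a) = false := by simp [h]
        simp [h1, Ne.symm h]
    calc ((a :: l1).map fun x => ((l2.count x : Nat) : Int)).sum
        = ((l2.count a : Nat) : Int) + (l1.map fun x => ((l2.count x : Nat) : Int)).sum := by
          simp
      _ = ((l2.count a : Nat) : Int) + (l2.map fun b => ((l1.count b : Nat) : Int)).sum := by
          rw [ih]
      _ = (l2.map fun b => (((a :: l1).count b : Nat) : Int)).sum := by
          have : (l2.map fun b => (((a :: l1).count b : Nat) : Int))
              = l2.map fun b => ((l1.count b : Nat) : Int) + (if b == a then (1 : Int) else 0) := by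
            exact List.map_congr_left (fun b _ => hcnt b)
          rw [this, PySem.List.sum_map_add_int, PySem.List.sum_map_ite_one_zero,
              ← List.count_eq_countP]
          ring
  -- rotations of cs are the length-n windows of cs ++ cs

theorem pvRotB_eq (cs : List Char) (k : Nat) (hk : k ≤ cs.length) :
    ((cs ++ cs).drop k).take cs.length = pvRot cs k := by
  rw [List.drop_append_of_le_length hk, List.take_append,
      List.take_of_length_le (by simp), List.length_drop]
  unfold pvRot
  congr 1
  congr 1
  omega

-- pyRange 0 z for an arbitrary (possibly nonpositive) Int bound
theorem pv_pyRange_zero (z : Int) :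
    PySem.List.pyRange 0 z = (List.range z.toNat).map (fun k : Nat => ((k : Nat) : Int)) := by
  by_cases hz : 0 ≤ z
  · have h : z = (z.toNat : Int) := by omega
    conv_lhs => rw [h]
    exact PySem.List.pyRange_zero_natCast z.toNat
  · have h0 : z.toNat = 0 := by omega
    rw [h0]
    unfold PySem.List.pyRange
    dsimp only
    split_ifs <;> first | rfl | omega

-- ===== VERDICT (by name: the statement is the Claim_ definition above) =====
-- the length of a rotation
theorem pvRot_length (cs : List Char) (k : Nat) (hk : k ≤ cs.length) :
    (pvRot cs k).length = cs.length := by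
  simp [pvRot]
  omega

-- A computes the sum over rotations of the number of equal windows
theorem pvA_eq (s text : String) (hs : s.toList ≠ []) (ht : text.toList ≠ []) :
    gotintothattxt s text
      = ((List.range s.toList.length).map
          (fun k => (((pvWins text.toList s.toList.length).count (pvRot s.toList k) : Nat) : Int))).sum := by
  unfold gotintothattxt
  rw [if_neg (by simp [hs, ht])]
  rw [PySem.List.pyRange_zero_natCast, List.foldl_map]
  rw [PySem.List.foldl_congr_mem _ _
      (fun total k => total + pvOcc text.toList (pvRot s.toList k) 0) 0
      (by
        intro acc k hk
        rw [PySem.List.slice_from_natCast, PySem.List.slice_to_natCast]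
        show pvFindLoopA text.toList (pvRot s.toList k) ((0 : Nat) : Int) acc
          = acc + pvOcc text.toList (pvRot s.toList k) 0
        rw [pvFindLoopA_eq text.toList (pvRot s.toList k) (text.toList.length + 1) 0
            (by omega) acc])]
  rw [PySem.List.foldl_add]
  rw [List.map_congr_left (fun k hk => by
    have hk' : k ≤ s.toList.length := le_of_lt (List.mem_range.mp hk)
    exact pvOcc_eq_count text.toList (pvRot s.toList k) s.toList.length
      (List.length_pos_iff.mpr hs) (pvRot_length s.toList k hk'))]
  ring

-- B computes the sum over windows of the number of equal rotations
theorem pvB_eq (s text : String) (hs : s.toList ≠ []) (ht : text.toList ≠ []) :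
    gotintothattxt_alt s text
      = ((pvWins text.toList s.toList.length).map
          (fun w => ((((List.range s.toList.length).map (pvRot s.toList)).count w : Nat) : Int))).sum := by
  unfold gotintothattxt_alt
  rw [if_neg (by simp [hs, ht])]
  dsimp only
  rw [PySem.List.pyRange_zero_natCast, List.foldl_map]
  rw [PySem.List.foldl_congr_mem _ _
      (fun d k => d.insert (pvRot s.toList k) (d.getD (pvRot s.toList k) 0 + 1)) PySem.Dict.empty
      (by
        intro d k hk
        have hk' : k ≤ s.toList.length := le_of_lt (List.mem_range.mp hk)
        rw [PySem.List.slice_natCast_add, pvRotB_eq s.toList k hk'])]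
  rw [← List.foldl_map (f := pvRot s.toList)
      (g := fun d x => PySem.Dict.insert d x (d.getD x 0 + 1))]
  rw [pv_pyRange_zero, List.foldl_map]
  have htn : ((text.toList.length : Int) - (s.toList.length : Int) + 1).toNat
      = text.toList.length + 1 - s.toList.length := by omega
  rw [htn]
  rw [PySem.List.foldl_congr_mem _ _
      (fun total i => total +
        ((((List.range s.toList.length).map (pvRot s.toList)).count (pvWin text.toList s.toList.length i) : Nat) : Int)) 0
      (by
        intro acc i _
        rw [PySem.List.slice_natCast_add,
            PySem.Dict.getD_foldl_insert_add_one, PySem.Dict.getD_empty]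
        norm_num
        rfl)]
  rw [PySem.List.foldl_add]
  rw [pvWins, List.map_map, zero_add]
  rfl

theorem gotintothattxt_spec : Claim_equal_gotintothattxt := by
  intro s text _
  show gotintothattxt s text = gotintothattxt_alt s text
  by_cases hempty : s.toList = [] ∨ text.toList = []
  · unfold gotintothattxt gotintothattxt_alt
    rw [if_pos hempty, if_pos hempty]
  · obtain ⟨hs, ht⟩ := not_or.mp hempty
    rw [pvA_eq s text hs ht, pvB_eq s text hs ht]
    have hmm : (List.map
          (fun k => (((pvWins text.toList s.toList.length).count (pvRot s.toList k) : Nat) : Int))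
          (List.range s.toList.length))
        = List.map (fun a => (((pvWins text.toList s.toList.length).count a : Nat) : Int))
            ((List.range s.toList.length).map (pvRot s.toList)) := by
      rw [List.map_map]
      rfl
    rw [hmm]
    exact pv_sum_count_comm _ _
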